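-- pv_equiv track=rewrite | github.com/marcelcastillo/Recommender | recommender_v3.py | userLikesMostArtists
-- ===== SOURCE A (Python) =====
-- def userLikesMostArtists(currUser, userMap):
--     publicUsers = {}
--     for user in userMap:
--         if user == currUser:
--             publicUsers[user] = userMap[user]
--         elif user[-1] != '$':
--             publicUsers[user] = userMap[user]
--     if publicUsers == {}:
--         return 'Sorry, no user found.'
--
--     mostLikes = -1
--     mostLikedUser = ''
--     for user in publicUsers:
--         if len(publicUsers[user]) >= mostLikes:
--             mostLikes = len(publicUsers[user])
--             mostLikedUser = user
--     return mostLikedUser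
-- ===== SOURCE B (Python) =====
-- def userLikesMostArtists(currUser, userMap):
--     public = [(u, likes) for u, likes in userMap.items()
--               if u == currUser or u[-1] != '$']
--     if not public:
--         return 'Sorry, no user found.'
--     # stable ascending sort: maximum-length users end up last, in original
--     # order, so [-1] is the last user with the most liked artists (A's '>='
--     # last-wins tie-break).
--     return sorted(public, key=lambda p: len(p[1]))[-1][0]
-- ===== Notes on version B (the rewrite author's own statement) =====
-- stated objective: simpler
-- what changed: Replaces the running-max scan with a single filtering comprehension plus a stable ascending sort whose last element is A's last-wins maximum.
import Mathlib
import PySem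

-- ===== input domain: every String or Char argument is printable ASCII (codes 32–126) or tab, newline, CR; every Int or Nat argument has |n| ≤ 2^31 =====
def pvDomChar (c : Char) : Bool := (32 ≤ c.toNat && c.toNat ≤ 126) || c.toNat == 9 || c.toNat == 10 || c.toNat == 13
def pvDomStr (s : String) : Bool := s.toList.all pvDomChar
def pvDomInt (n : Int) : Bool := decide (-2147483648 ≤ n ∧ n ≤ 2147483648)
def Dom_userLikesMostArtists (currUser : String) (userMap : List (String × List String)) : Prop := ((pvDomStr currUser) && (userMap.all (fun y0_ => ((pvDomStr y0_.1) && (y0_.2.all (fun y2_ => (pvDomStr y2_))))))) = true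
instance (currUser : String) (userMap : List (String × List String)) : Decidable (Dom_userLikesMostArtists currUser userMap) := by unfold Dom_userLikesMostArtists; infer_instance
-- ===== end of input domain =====

-- B replaces A's running-max scan by filter + stable ascending sort + last element (objective: simpler).


-- ===== PORT A =====
-- `user[-1]` is PySem.Str.pyGet? … (-1); its `none` case (empty key ≠ currUser,
-- an IndexError in Python) is excluded by Pre_ below, the `.getD '$'` default there is arbitrary.
def userLikesMostArtists (currUser : String) (userMap : List (String × List String)) : String :=
  let m : PySem.Dict String (List String) := PySem.Dict.mk userMap
  let publicUsers : PySem.Dict String (List String) :=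
    userMap.foldl (fun d p =>
      if p.1 == currUser then d.insert p.1 (m.getD p.1 [])
      else if ((PySem.Str.pyGet? p.1 (-1)).getD '$') != '$' then d.insert p.1 (m.getD p.1 [])
      else d) PySem.Dict.empty
  if publicUsers.items = [] then "Sorry, no user found."
  else
    let r := publicUsers.items.foldl (fun (st : Int × String) q =>
      if (q.2.length : Int) ≥ st.1 then ((q.2.length : Int), q.1) else st) (-1, "")
    r.2

-- ===== PORT B =====
def userLikesMostArtists_alt (currUser : String) (userMap : List (String × List String)) : String :=
  let publ := userMap.filter (fun p =>
    p.1 == currUser || ((PySem.Str.pyGet? p.1 (-1)).getD '$') != '$')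
  if publ = [] then "Sorry, no user found."
  else (PySem.List.pyGetD
          (PySem.List.sorted publ (fun p => (p.2.length : Int)) false) (-1) ("", [])).1

-- ===== PRECONDITION & SPEC =====
-- Pre_ excludes (a) userMap with duplicate keys — the Python argument is a dict, so
-- duplicate entries of the association list are collapsed last-wins before either
-- program sees them, which the assoc-list model cannot represent — and (b) an
-- empty-string key different from currUser, on which both Pythons raise IndexError.
def Pre_userLikesMostArtists (currUser : String) (userMap : List (String × List String)) : Prop :=
  (userMap.map Prod.fst).Nodup ∧ ∀ p ∈ userMap, p.1 = currUser ∨ p.1 ≠ ""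
instance (currUser : String) (userMap : List (String × List String)) : Decidable (Pre_userLikesMostArtists currUser userMap) := by unfold Pre_userLikesMostArtists; infer_instance
def pvWitness_userLikesMostArtists : String × (List (String × List String)) :=
  ("me", [("me", ["a"]), ("bob$", ["b", "c"]), ("eve", ["d", "e"])])
def Spec_userLikesMostArtists (currUser : String) (userMap : List (String × List String)) (out : String) : Prop := out = userLikesMostArtists_alt currUser userMap
instance (currUser : String) (userMap : List (String × List String)) (out : String) : Decidable (Spec_userLikesMostArtists currUser userMap out) := by unfold Spec_userLikesMostArtists; infer_instance

-- ===== CLAIM (what is proved, stated in full; the proofs are below) =====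
def Claim_equal_userLikesMostArtists : Prop := ∀ (currUser : String) (userMap : List (String × List String)), Dom_userLikesMostArtists currUser userMap → Pre_userLikesMostArtists currUser userMap → Spec_userLikesMostArtists currUser userMap (userLikesMostArtists currUser userMap)

-- ===== LEMMAS AND PROOFS =====

def pvKey (q : String × List String) : Int := q.2.length
def pvBef (a b : String × List String) : Bool := decide (pvKey a < pvKey b)
def pvStep (st : Int × String) (q : String × List String) : Int × String :=
  if pvKey q ≥ st.1 then (pvKey q, q.1) else st
def pvG (s : List (String × List String)) : Int × String :=
  match s.getLast? with
  | none => (-1, "")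
  | some t => (pvKey t, t.1)

theorem pvLast_cons {α : Type} (y : α) (l : List α) (h : l ≠ []) :
    (y :: l).getLast? = l.getLast? := by
  cases l with
  | nil => exact absurd rfl h
  | cons a t => rw [List.getLast?_cons_cons]

-- insertBy does not move the last element when some element already beats x
theorem pvInsert_last (x : String × List String) :
    ∀ s : List (String × List String), (∃ y ∈ s, pvKey x < pvKey y) →
      (PySem.List.insertBy pvBef x s).getLast? = s.getLast? := by
  intro s
  induction s with
  | nil => rintro ⟨y, hy, _⟩; cases hy
  | cons y ys ih =>
    rintro ⟨z, hz, hlt⟩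
    by_cases hb : pvBef x y = true
    · simp [PySem.List.insertBy, hb]
    · have hzys : z ∈ ys := by
        rcases hz with _ | hz
        · exact absurd (by simp [pvBef, hlt]) hb
        · assumption
      have hrw : PySem.List.insertBy pvBef x (y :: ys) = y :: PySem.List.insertBy pvBef x ys := by
        simp [PySem.List.insertBy, hb]
      have hne : PySem.List.insertBy pvBef x ys ≠ [] := by
        intro h
        have := (PySem.List.mem_insertBy pvBef x x ys).2 (Or.inl rfl)
        rw [h] at this; cases this
      have hne' : ys ≠ [] := by intro h; subst h; cases hzys
      rw [hrw, pvLast_cons _ _ hne, pvLast_cons _ _ hne']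
      exact ih ⟨z, hzys, hlt⟩

theorem pvStepG (x : String × List String) (s : List (String × List String))
    (hs : s.Pairwise (fun a b => pvKey a ≤ pvKey b)) :
    pvStep (pvG s) x = pvG (PySem.List.insertBy pvBef x s) := by
  rcases List.eq_nil_or_concat s with rfl | ⟨s', t, rfl⟩
  · have : pvKey x ≥ (-1 : Int) := by
      have : (0:Int) ≤ pvKey x := by simp [pvKey]
      omega
    simp [pvG, pvStep, PySem.List.insertBy, this]
  · simp only [List.concat_eq_append] at *
    have hlast : (s' ++ [t]).getLast? = some t := List.getLast?_concat
    by_cases hx : pvKey x ≥ pvKey t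
    · have hall : ∀ y ∈ s' ++ [t], pvBef x y = false := by
        intro y hy
        rcases List.mem_append.1 hy with hy' | hy'
        · have := (List.pairwise_append.1 hs).2.2 y hy' t (by simp)
          simp only [pvBef, decide_eq_false_iff_not, not_lt]; omega
        · simp only [List.mem_singleton] at hy'; subst hy'
          simp only [pvBef, decide_eq_false_iff_not, not_lt]; omega
      rw [PySem.List.insertBy_of_forall_not_before _ _ _ hall]
      simp [pvG, pvStep, hlast, hx]
    · have := pvInsert_last x (s' ++ [t]) ⟨t, by simp, by omega⟩
      simp [pvG, pvStep, hlast, hx, this]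

theorem pvFoldG : ∀ (l pfx : List (String × List String)),
    l.foldl pvStep (pvG (PySem.List.sorted pfx pvKey false)) =
      pvG (PySem.List.sorted (pfx ++ l) pvKey false) := by
  intro l
  induction l with
  | nil => intro pfx; simp
  | cons x l ih =>
    intro pfx
    have hins : PySem.List.sorted (pfx ++ [x]) pvKey false
        = PySem.List.insertBy pvBef x (PySem.List.sorted pfx pvKey false) := by
      rw [PySem.List.sorted_eq_foldl_insertBy, PySem.List.sorted_eq_foldl_insertBy,
        List.foldl_append]
      rfl
    have hstep : pvStep (pvG (PySem.List.sorted pfx pvKey false)) x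
        = pvG (PySem.List.sorted (pfx ++ [x]) pvKey false) := by
      rw [hins]
      exact pvStepG x _ (PySem.List.sorted_pairwise pfx pvKey)
    calc (x :: l).foldl pvStep (pvG (PySem.List.sorted pfx pvKey false))
        = l.foldl pvStep (pvG (PySem.List.sorted (pfx ++ [x]) pvKey false)) := by
          rw [List.foldl_cons, hstep]
      _ = pvG (PySem.List.sorted ((pfx ++ [x]) ++ l) pvKey false) := ih (pfx ++ [x])
      _ = pvG (PySem.List.sorted (pfx ++ x :: l) pvKey false) := by
          rw [List.append_assoc]; rfl

def pvCond (currUser : String) (p : String × List String) : Bool :=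
  p.1 == currUser || ((PySem.Str.pyGet? p.1 (-1)).getD '$') != '$'

-- the dict-building loop of A, with distinct keys, is filter + map
theorem pvFoldItems (currUser : String) (v : String → List String) :
    ∀ (l : List (String × List String)) (d : PySem.Dict String (List String)),
      (∀ p ∈ l, d.contains p.1 = false) → (l.map Prod.fst).Nodup →
      (l.foldl (fun d p => if pvCond currUser p then d.insert p.1 (v p.1) else d) d).items
        = d.items ++ (l.filter (pvCond currUser)).map (fun p => (p.1, v p.1)) := by
  intro l
  induction l with
  | nil => intro d _ _; simp
  | cons p l ih =>
    intro d hc hnd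
    simp only [List.map_cons, List.nodup_cons] at hnd
    have hp : d.contains p.1 = false := hc p (by simp)
    by_cases h : pvCond currUser p = true
    · have hrest : ∀ q ∈ l, (d.insert p.1 (v p.1)).contains q.1 = false := by
        intro q hq
        rw [PySem.Dict.contains_insert]
        have : q.1 ≠ p.1 := by
          intro he; exact hnd.1 (he ▸ List.mem_map_of_mem hq)
        simp [this, hc q (List.mem_cons_of_mem _ hq)]
      rw [List.foldl_cons, if_pos h, ih _ hrest hnd.2,
        PySem.Dict.items_insert_of_not_contains _ _ hp]
      simp [h]
    · rw [List.foldl_cons, if_neg h, ih _ (fun q hq => hc q (List.mem_cons_of_mem _ hq)) hnd.2]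
      simp [h]

theorem userLikesMostArtists_spec : Claim_equal_userLikesMostArtists := by
  intro currUser userMap _ hpre
  obtain ⟨hnd, hkey⟩ := hpre
  unfold Spec_userLikesMostArtists userLikesMostArtists userLikesMostArtists_alt
  simp only []
  set m : PySem.Dict String (List String) := PySem.Dict.mk userMap with hm
  -- A's first loop body in the pvCond form
  have hbody : (fun (d : PySem.Dict String (List String)) (p : String × List String) =>
      if p.1 == currUser then d.insert p.1 (m.getD p.1 [])
      else if ((PySem.Str.pyGet? p.1 (-1)).getD '$') != '$' then d.insert p.1 (m.getD p.1 [])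
      else d)
      = (fun d p => if pvCond currUser p then d.insert p.1 ((fun k => m.getD k []) p.1) else d) := by
    funext d p
    by_cases h1 : p.1 == currUser
    · simp [pvCond, h1]
    · simp [pvCond, h1]
  have hitems : (userMap.foldl (fun (d : PySem.Dict String (List String)) p =>
      if p.1 == currUser then d.insert p.1 (m.getD p.1 [])
      else if ((PySem.Str.pyGet? p.1 (-1)).getD '$') != '$' then d.insert p.1 (m.getD p.1 [])
      else d) PySem.Dict.empty).items
      = (userMap.filter (pvCond currUser)).map (fun p => (p.1, m.getD p.1 [])) := by
    rw [hbody, pvFoldItems currUser (fun k => m.getD k []) userMap PySem.Dict.empty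
      (fun p _ => PySem.Dict.contains_empty p.1) hnd]
    simp [show (PySem.Dict.empty : PySem.Dict String (List String)).items = [] from rfl]
  -- values looked up in m are the original values
  have hmk : m.keys.Nodup := by rw [hm]; simpa [PySem.Dict.keys_mk] using hnd
  have hv : ∀ p ∈ userMap.filter (pvCond currUser), (p.1, m.getD p.1 []) = p := by
    intro p hp
    have hpm : p ∈ userMap := List.mem_of_mem_filter hp
    have : m.getD p.1 [] = p.2 := by
      have hmem : (p.1, p.2) ∈ m.items := by rw [hm]; exact hpm
      exact PySem.Dict.getD_of_mem_items m hmem hmk []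
    rw [this]
  have hpub : (userMap.filter (pvCond currUser)).map (fun p => (p.1, m.getD p.1 [])) =
      userMap.filter (pvCond currUser) := by
    rw [List.map_congr_left hv, List.map_id']
  -- the filter in B is the same condition
  have hfB : userMap.filter (fun p =>
      p.1 == currUser || ((PySem.Str.pyGet? p.1 (-1)).getD '$') != '$')
      = userMap.filter (pvCond currUser) := rfl
  rw [hitems, hpub, hfB]
  set pub := userMap.filter (pvCond currUser) with hpubdef
  by_cases hnil : pub = []
  · simp [hnil]
  · rw [if_neg hnil, if_neg hnil]
    -- A's scan equals pvG of the sorted list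
    have hstepfun : (fun (st : Int × String) (q : String × List String) =>
        if (q.2.length : Int) ≥ st.1 then ((q.2.length : Int), q.1) else st) = pvStep := by
      funext st q; simp [pvStep, pvKey]
    have hscan : pub.foldl pvStep (-1, "") = pvG (PySem.List.sorted pub pvKey false) := by
      have := pvFoldG pub []
      simpa [pvG, PySem.List.sorted] using this
    have hsnil : PySem.List.sorted pub pvKey false ≠ [] := by
      rw [Ne, PySem.List.sorted_eq_nil_iff]; exact hnil
    have hkeyfun : (fun p : String × List String => (p.2.length : Int)) = pvKey := rfl
    rw [hstepfun, hscan, hkeyfun, PySem.List.pyGetD_neg_one _ _ hsnil]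
    unfold pvG
    rw [List.getLast?_eq_some_getLast hsnil]
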